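-- pv_equiv track=rewrite | github.com/Boomatang/compile-tree | main.py | get_version_data
-- ===== SOURCE A (Python) =====
-- def get_version_data(data):
--     values = {}
--     for line in data.split('\n'):
--         line = line.split('@')
--         package = line[0]
--         try:
--             version = line[1]
--         except IndexError:
--             version = "Not Set"
--
--         if package == '':
--             break
--         if package in values.keys():
--             if version in values[package].keys():
--                 values[package][version] += 1
--             else:
--                 values[package][version] = 1
--         else:
--             values.setdefault(package, {version: 1})
--
--     return values
-- ===== SOURCE B (Python) =====
-- def get_version_data(data):
--     # phase 1: collect (package, version) pairs, stopping at the first empty package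
--     pairs = []
--     for line in data.split('\n'):
--         parts = line.split('@')
--         if parts[0] == '':
--             break
--         pairs.append((parts[0], parts[1] if len(parts) > 1 else "Not Set"))
--     # phase 2: tabulate flat counts per (package, version) pair
--     counts = {}
--     for key in pairs:
--         counts[key] = counts.get(key, 0) + 1
--     # phase 3: reshape flat counts into the nested dict
--     values = {}
--     for (pkg, ver), n in counts.items():
--         values.setdefault(pkg, {})[ver] = n
--     return values
-- ===== Notes on version B (the rewrite author's own statement) =====
-- stated objective: alternative
-- what changed: A counts into the nested dict inline with per-line membership branching; B is a three-phase pipeline: collect the (package, version) pairs (breaking at the first empty package), tabulate flat counts keyed by the pair, then reshape the flat counts into the nested dict with setdefault.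
import Mathlib
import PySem

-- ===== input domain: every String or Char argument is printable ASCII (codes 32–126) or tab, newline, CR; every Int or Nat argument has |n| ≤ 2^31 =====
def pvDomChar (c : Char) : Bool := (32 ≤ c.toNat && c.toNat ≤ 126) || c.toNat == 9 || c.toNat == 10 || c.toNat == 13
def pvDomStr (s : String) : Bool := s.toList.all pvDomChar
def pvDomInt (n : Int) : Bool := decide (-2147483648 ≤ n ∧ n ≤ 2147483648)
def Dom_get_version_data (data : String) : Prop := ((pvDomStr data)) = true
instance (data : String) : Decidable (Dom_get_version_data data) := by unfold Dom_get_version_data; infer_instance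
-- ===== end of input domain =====

-- B replaces A's inline nested counting with a collect → tabulate → reshape pipeline (alternative decomposition, same cost).

-- ===== PORT A =====
-- A's for-loop; `break` returns the accumulated dict.  'split?' with a nonempty literal separator is always 'some';
-- str.split never yields an empty list, so 'headD ""' is line[0]; 'pyGet? parts 1' is the try/except around line[1].
def pvA_loop (lines : List String) (values : PySem.Dict String (PySem.Dict String Int)) :
    PySem.Dict String (PySem.Dict String Int) :=
  match lines with
  | [] => values
  | line :: rest =>
    let parts := (PySem.Str.split? line "@").getD []
    let package := parts.headD ""
    let version := (PySem.List.pyGet? parts 1).getD "Not Set"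
    if package = "" then values
    else
      pvA_loop rest
        (if values.contains package then
          if (values.getD package PySem.Dict.empty).contains version then
            values.modify package PySem.Dict.empty (fun inner => inner.modify version 0 (· + 1))
          else
            values.modify package PySem.Dict.empty (fun inner => inner.insert version 1)
        else
          values.setdefault package (PySem.Dict.ofList [(version, 1)]))

def get_version_data (data : String) : List (String × List (String × Int)) :=
  ((pvA_loop ((PySem.Str.split? data "\n").getD []) PySem.Dict.empty).items).map
    (fun p => (p.1, p.2.items))

-- ===== PORT B =====
-- phase 1 of Source B: collect (package, version) pairs, stopping at the first empty package
def pvB_pairs (lines : List String) : List (String × String) :=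
  match lines with
  | [] => []
  | line :: rest =>
    let parts := (PySem.Str.split? line "@").getD []
    if parts.headD "" = "" then []
    else (parts.headD "", if 1 < parts.length then parts.getD 1 "" else "Not Set") :: pvB_pairs rest

def get_version_data_alt (data : String) : List (String × List (String × Int)) :=
  let pairs := pvB_pairs ((PySem.Str.split? data "\n").getD [])
  -- phase 2: counts[key] = counts.get(key, 0) + 1
  let counts := pairs.foldl (fun d key => d.insert key (d.getD key 0 + 1)) PySem.Dict.empty
  -- phase 3: values.setdefault(pkg, {})[ver] = n
  let values := counts.items.foldl
    (fun vals x => vals.modify x.1.1 PySem.Dict.empty (fun inner => inner.insert x.1.2 x.2))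
    PySem.Dict.empty
  values.items.map (fun p => (p.1, p.2.items))

-- ===== PRECONDITION & SPEC =====
def Spec_get_version_data (data : String) (out : List (String × List (String × Int))) : Prop := out = get_version_data_alt data
instance (data : String) (out : List (String × List (String × Int))) : Decidable (Spec_get_version_data data out) := by unfold Spec_get_version_data; infer_instance

-- ===== CLAIM (what is proved, stated in full; the proofs are below) =====
def Claim_equal_get_version_data : Prop := ∀ (data : String), Dom_get_version_data data → Spec_get_version_data data (get_version_data data)

-- ===== LEMMAS AND PROOFS =====

-- A's fold over the nested dict, after collapsing its three branches to one modify-modify step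
def pvG (L : List (String × String)) : PySem.Dict String (PySem.Dict String Int) :=
  L.foldl (fun d x => d.modify x.1 PySem.Dict.empty (fun inner => inner.modify x.2 0 (· + 1)))
    PySem.Dict.empty

-- B's reshape fold, applied to the items of the counter
def pvR (L : List (String × String)) : PySem.Dict String (PySem.Dict String Int) :=
  ((PySem.Set.ofList L).map (fun k => (k, (L.count k : Int)))).foldl
    (fun vals x => vals.modify x.1.1 PySem.Dict.empty (fun inner => inner.insert x.1.2 x.2))
    PySem.Dict.empty

theorem pv_getD_foldl_modify_key {κ ν β : Type} [BEq κ] [LawfulBEq κ] [DecidableEq κ]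
    (l : List β) (key : β → κ) (d0 : ν) (f : β → ν → ν) (d : PySem.Dict κ ν) (c : κ) :
    (l.foldl (fun d x => d.modify (key x) d0 (f x)) d).getD c d0 =
      (l.filter (fun x => key x == c)).foldl (fun acc x => f x acc) (d.getD c d0) := by
  induction l generalizing d with
  | nil => rfl
  | cons x t ih =>
    simp only [List.foldl_cons, List.filter_cons, ih, PySem.Dict.getD_modify]
    by_cases hc : key x == c
    · have : c = key x := (beq_iff_eq.mp hc).symm
      simp [this]
    · simp only [hc, if_neg (fun h : c = key x => hc (beq_iff_eq.mpr h.symm)), Bool.false_eq_true,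
        if_false]

theorem pv_ofList_filter {α : Type} [BEq α] [LawfulBEq α] (l : List α) (p : α → Bool) :
    PySem.Set.ofList (l.filter p) = (PySem.Set.ofList l).filter p := by
  induction l with
  | nil => rfl
  | cons x t ih =>
    rw [List.filter_cons, PySem.Set.ofList_cons]
    by_cases hx : p x
    · simp only [hx, if_pos]
      rw [PySem.Set.ofList_cons, ih]
      show x :: List.filter (fun y => !y == x) (List.filter p (PySem.Set.ofList t)) =
        List.filter p (x :: List.filter (fun y => !y == x) (PySem.Set.ofList t))
      rw [List.filter_cons, if_pos hx, List.filter_filter, List.filter_filter]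
      congr 1
      exact List.filter_congr (fun y _ => by rw [Bool.and_comm])
    · simp only [hx]
      show PySem.Set.ofList (List.filter p t) =
        List.filter p (x :: List.filter (fun y => !y == x) (PySem.Set.ofList t))
      rw [List.filter_cons, if_neg (by simp [hx]), List.filter_filter, ih]
      exact List.filter_congr (fun y hy => by
        by_cases hyx : y = x
        · subst hyx; simp [hx]
        · simp [hyx])

theorem pv_ofList_map_inj {α β : Type} [BEq α] [LawfulBEq α] [BEq β] [LawfulBEq β]
    (l : List α) (f : α → β) (h : ∀ a ∈ l, ∀ b ∈ l, f a = f b → a = b) :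
    PySem.Set.ofList (l.map f) = (PySem.Set.ofList l).map f := by
  induction l with
  | nil => rfl
  | cons x t ih =>
    rw [List.map_cons, PySem.Set.ofList_cons, PySem.Set.ofList_cons,
      ih (fun a ha b hb => h a (by simp [ha]) b (by simp [hb])), List.map_cons]
    show f x :: List.filter (fun y => !y == f x) ((PySem.Set.ofList t).map f) =
      f x :: ((PySem.Set.ofList t).filter (fun y => !y == x)).map f
    rw [List.filter_map]
    congr 1
    apply congrArg
    apply List.filter_congr
    intro y hy
    have hyt : y ∈ t := (PySem.Set.mem_ofList t y).mp hy
    simp only [Function.comp]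
    by_cases hyx : y = x
    · subst hyx; simp
    · have : ¬ f y = f x := fun hf => hyx (h y (by simp [hyt]) x (by simp) hf)
      simp [hyx, this]

theorem pv_ofList_map_ofList {α β : Type} [BEq α] [LawfulBEq α] [BEq β] [LawfulBEq β]
    (l : List α) (f : α → β) :
    PySem.Set.ofList (l.map f) = PySem.Set.ofList ((PySem.Set.ofList l).map f) := by
  induction l with
  | nil => rfl
  | cons x t ih =>
    rw [List.map_cons, PySem.Set.ofList_cons, PySem.Set.ofList_cons, List.map_cons,
      PySem.Set.ofList_cons, ih]
    congr 1
    show List.filter (fun y => !y == f x) (PySem.Set.ofList ((PySem.Set.ofList t).map f)) =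
      List.filter (fun y => !y == f x) (PySem.Set.ofList (((PySem.Set.ofList t).filter (fun y => !y == x)).map f))
    rw [← pv_ofList_filter, ← pv_ofList_filter]
    congr 1
    rw [List.filter_map, List.filter_map, List.filter_filter]
    apply congrArg
    apply List.filter_congr
    intro a _
    by_cases hfa : f a = f x
    · simp [Function.comp, hfa]
    · have hax : ¬ a = x := fun h => hfa (by rw [h])
      simp [Function.comp, hfa, hax]

theorem pv_version_eq (parts : List String) :
    (PySem.List.pyGet? parts 1).getD "Not Set" =
      if 1 < parts.length then parts.getD 1 "" else "Not Set" := by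
  rcases parts with _ | ⟨a, _ | ⟨b, t⟩⟩ <;> simp [PySem.List.pyGet?, PySem.List.pyIdx?]

theorem pv_count_map_snd (M : List (String × String)) (p v : String)
    (h : ∀ x ∈ M, x.1 = p) : (M.map Prod.snd).count v = M.count (p, v) := by
  induction M with
  | nil => simp
  | cons x t ih =>
    have hx := h x (by simp)
    have ih' := ih (fun y hy => h y (by simp [hy]))
    rcases x with ⟨a, b⟩
    simp only [List.map_cons, List.count_cons, ih']
    simp_all [Prod.ext_iff]

theorem pvA_eq_G (lines : List String) (values : PySem.Dict String (PySem.Dict String Int)) :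
    pvA_loop lines values =
      (pvB_pairs lines).foldl
        (fun d x => d.modify x.1 PySem.Dict.empty (fun inner => inner.modify x.2 0 (· + 1))) values := by
  induction lines generalizing values with
  | nil => rfl
  | cons line rest ih =>
    rw [pvA_loop, pvB_pairs]
    by_cases hp : ((PySem.Str.split? line "@").getD []).headD "" = ""
    · simp only [hp, if_pos, List.foldl_nil]
    · simp only [hp, if_false, List.foldl_cons, ih, ← pv_version_eq]
      congr 1
      set parts := (PySem.Str.split? line "@").getD [] with hparts
      set package := parts.headD "" with hpk
      set version := (PySem.List.pyGet? parts 1).getD "Not Set" with hv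
      by_cases hc : values.contains package
      · simp only [hc, if_true]
        by_cases hcv : (values.getD package PySem.Dict.empty).contains version
        · simp only [hcv, if_true]
        · have h0 : (values.getD package PySem.Dict.empty).getD version 0 = 0 :=
            PySem.Dict.getD_of_not_contains _ 0 (by simpa using hcv)
          simp only [hcv, Bool.false_eq_true, if_false, PySem.Dict.modify, h0]
          norm_num
      · rw [if_neg (by simpa using hc), PySem.Dict.setdefault_of_not_contains _ _ (by simpa using hc)]
        simp only [PySem.Dict.modify, PySem.Dict.getD_of_not_contains _ _ (by simpa using hc)]
        rfl

theorem pv_keys_G (L : List (String × String)) :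
    (pvG L).keys = PySem.Set.ofList (L.map Prod.fst) := by
  unfold pvG
  rw [PySem.Dict.keys_foldl_modify_key L Prod.fst PySem.Dict.empty
    (fun _ x inner => inner.modify x.2 0 (· + 1)) PySem.Dict.empty,
    PySem.Dict.keys_empty, PySem.Set.update_nil_left]

theorem pv_keys_R (L : List (String × String)) :
    (pvR L).keys = PySem.Set.ofList ((PySem.Set.ofList L).map Prod.fst) := by
  unfold pvR
  have h := PySem.Dict.keys_foldl_modify_key
    ((PySem.Set.ofList L).map (fun k => (k, (L.count k : Int)))) (fun x => x.1.1)
    PySem.Dict.empty (fun _ x inner => inner.insert x.1.2 x.2) PySem.Dict.empty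
  beta_reduce at h
  rw [h, PySem.Dict.keys_empty, PySem.Set.update_nil_left, List.map_map]
  rfl

theorem pv_getD_G (L : List (String × String)) (p : String) :
    (pvG L).getD p PySem.Dict.empty =
      PySem.Dict.counter ((L.filter (fun x => x.1 == p)).map Prod.snd) := by
  unfold pvG
  rw [pv_getD_foldl_modify_key L Prod.fst PySem.Dict.empty
    (fun x inner => inner.modify x.2 0 (· + 1)) PySem.Dict.empty p,
    PySem.Dict.counter_eq_foldl, List.foldl_map]
  rfl

theorem pv_getD_R (L : List (String × String)) (p : String) :
    (pvR L).getD p PySem.Dict.empty =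
      (PySem.Set.ofList (L.filter (fun x => x.1 == p))).foldl
        (fun acc k => acc.insert k.2 (L.count k : Int)) PySem.Dict.empty := by
  unfold pvR
  have h := pv_getD_foldl_modify_key
    ((PySem.Set.ofList L).map (fun k => (k, (L.count k : Int)))) (fun x => x.1.1)
    PySem.Dict.empty (fun x inner => inner.insert x.1.2 x.2) PySem.Dict.empty p
  beta_reduce at h
  rw [h, List.filter_map, ← pv_ofList_filter, List.foldl_map]
  rfl

theorem pv_inner_eq (L : List (String × String)) (p : String) :
    (pvG L).getD p PySem.Dict.empty = (pvR L).getD p PySem.Dict.empty := by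
  have hmem : ∀ x ∈ L.filter (fun x => x.1 == p), x.1 = p := by
    intro x hx
    simpa using (List.of_mem_filter hx)
  have hinj : ∀ a ∈ L.filter (fun x => x.1 == p), ∀ b ∈ L.filter (fun x => x.1 == p),
      Prod.snd a = Prod.snd b → a = b := by
    intro a ha b hb hab
    exact Prod.ext_iff.mpr ⟨(hmem a ha).trans (hmem b hb).symm, hab⟩
  set M := L.filter (fun x => x.1 == p) with hM
  apply PySem.Dict.ext
  rw [pv_getD_G, pv_getD_R]
  have hnodupmap : ((PySem.Set.ofList M).map (fun a => a.2)).Nodup := by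
    apply List.Nodup.map_on _ (PySem.Set.nodup_ofList M)
    intro a ha b hb
    exact hinj a ((PySem.Set.mem_ofList M a).mp ha) b ((PySem.Set.mem_ofList M b).mp hb)
  rw [PySem.Dict.items_counter, PySem.Dict.items_foldl_insert_fresh (PySem.Set.ofList M)
    (fun a => a.2) (fun a => (L.count a : Int)) PySem.Dict.empty
    (fun a _ => PySem.Dict.contains_empty _) hnodupmap,
    pv_ofList_map_inj M Prod.snd hinj, List.map_map]
  show _ = [] ++ _
  rw [List.nil_append]
  apply List.map_congr_left
  intro a ha
  have haM : a ∈ M := (PySem.Set.mem_ofList M a).mp ha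
  have hap : a.1 = p := hmem a haM
  simp only [Function.comp]
  congr 1
  rw [pv_count_map_snd M p a.2 hmem]
  have : (p, a.2) = a := Prod.ext_iff.mpr ⟨hap.symm, rfl⟩
  rw [this, hM, List.count_filter (by simp [hap])]

theorem pv_G_eq_R (L : List (String × String)) : pvG L = pvR L := by
  have ndG : (pvG L).keys.Nodup := by
    unfold pvG
    exact PySem.Dict.nodup_keys_foldl_modify_key L Prod.fst PySem.Dict.empty
      (fun _ x inner => inner.modify x.2 0 (· + 1)) PySem.Dict.empty PySem.Dict.nodup_keys_empty
  have ndR : (pvR L).keys.Nodup := by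
    unfold pvR
    exact PySem.Dict.nodup_keys_foldl_modify_key
      ((PySem.Set.ofList L).map (fun k => (k, (L.count k : Int))))
      (fun x : (String × String) × Int => x.1.1) PySem.Dict.empty
      (fun _ x inner => inner.insert x.1.2 x.2) PySem.Dict.empty PySem.Dict.nodup_keys_empty
  have hkeys : (pvG L).keys = (pvR L).keys := by
    rw [pv_keys_G, pv_keys_R, ← pv_ofList_map_ofList]
  apply PySem.Dict.ext
  rw [PySem.Dict.items_eq_map_keys _ ndG PySem.Dict.empty,
    PySem.Dict.items_eq_map_keys _ ndR PySem.Dict.empty, hkeys]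
  exact List.map_congr_left (fun p _ => by rw [pv_inner_eq])

-- ===== VERDICT (by name: the statement is the Claim_ definition above) =====
theorem get_version_data_spec : Claim_equal_get_version_data := by
  intro data _
  show get_version_data data = get_version_data_alt data
  unfold get_version_data get_version_data_alt
  rw [pvA_eq_G]
  show List.map (fun p => (p.1, p.2.items)) (pvG (pvB_pairs ((PySem.Str.split? data "\n").getD []))).items =
    List.map (fun p => (p.1, p.2.items))
      ((((pvB_pairs ((PySem.Str.split? data "\n").getD [])).foldl
          (fun d key => d.insert key (d.getD key 0 + 1)) PySem.Dict.empty).items.foldl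
        (fun vals x => vals.modify x.1.1 PySem.Dict.empty (fun inner => inner.insert x.1.2 x.2))
        PySem.Dict.empty).items)
  rw [PySem.Dict.foldl_insert_getD_add_one_eq_counter, PySem.Dict.items_counter, pv_G_eq_R]
  rfl
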